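-- pv_equiv track=rewrite | github.com/xinbingzhe/tianchi_koubei | train_pre/svr.py | create_weekend
-- ===== SOURCE A (Python) =====
-- def create_weekend(xweekend):
--     j = 3
--     qweekend = [68, 102, 190, 190, 229, 348, 446, 467]
--     for i in range(1,504):
--         if j == 6 or j ==7:
--             if i not in qweekend:
--                 xweekend.append(1)
--                 if j == 7:
--                     j = 1
--                 else:
--                     j += 1
--             else:
--                 if j == 7:
--                     j = 1
--                 else:
--                     j += 1
--                 xweekend.append(0)
--         else:
--             xweekend.append(0)
--             j += 1
--     return xweekend
-- ===== SOURCE B (Python) =====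
-- def create_weekend(xweekend):
--     holidays = {68, 102, 190, 229, 348, 446, 467}
--     for i in range(1, 504):
--         xweekend.append(1 if i % 7 in (4, 5) and i not in holidays else 0)
--     return xweekend
-- ===== Notes on version B (the rewrite author's own statement) =====
-- stated objective: simpler
-- what changed: B drops A's maintained day-of-week counter j with its wrap/increment branches and computes the weekend indicator positionally from i % 7 with a holiday set, appending one expression per day.
import Mathlib
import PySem

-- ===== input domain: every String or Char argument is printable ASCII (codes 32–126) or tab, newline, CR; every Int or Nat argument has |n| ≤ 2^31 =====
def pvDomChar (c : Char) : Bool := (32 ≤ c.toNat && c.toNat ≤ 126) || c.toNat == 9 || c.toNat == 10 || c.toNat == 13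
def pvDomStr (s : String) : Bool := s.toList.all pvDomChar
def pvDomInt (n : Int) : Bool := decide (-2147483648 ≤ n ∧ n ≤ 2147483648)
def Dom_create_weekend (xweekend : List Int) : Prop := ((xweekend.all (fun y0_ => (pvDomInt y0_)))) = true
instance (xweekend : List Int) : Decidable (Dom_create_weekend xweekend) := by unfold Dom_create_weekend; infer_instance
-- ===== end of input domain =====

-- B replaces A's running day-of-week counter j by computing the weekend test
-- positionally from i % 7, a simpler decomposition of the same 503-day table.
-- Both A and B mutate the argument list in place in Python (they append to it);
-- the equivalence proved here is about the returned value, which is that same list.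

-- ===== PORT A =====
-- the loop body of A: one step over state (accumulated list, j)
def pvStepA (s : List Int × Int) (i : Int) : List Int × Int :=
  if s.2 == 6 || s.2 == 7 then
    if !([68, 102, 190, 190, 229, 348, 446, 467].contains i) then
      (s.1 ++ [1], if s.2 == 7 then 1 else s.2 + 1)
    else
      (s.1 ++ [0], if s.2 == 7 then 1 else s.2 + 1)
  else
    (s.1 ++ [0], s.2 + 1)

def create_weekend (xweekend : List Int) : List Int :=
  ((PySem.List.pyRange 1 504 1).foldl pvStepA (xweekend, 3)).1

-- ===== PORT B =====
def pvIsWeekendOne (i : Int) : Int :=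
  if (PySem.Int.mod i 7 == 4 || PySem.Int.mod i 7 == 5)
      && !((PySem.Set.ofList [68, 102, 190, 229, 348, 446, 467]).contains i) then 1 else 0

def create_weekend_alt (xweekend : List Int) : List Int :=
  xweekend ++ (PySem.List.pyRange 1 504 1).map pvIsWeekendOne

-- ===== PRECONDITION & SPEC =====
def Spec_create_weekend (xweekend : List Int) (out : List Int) : Prop := out = create_weekend_alt xweekend
instance (xweekend : List Int) (out : List Int) : Decidable (Spec_create_weekend xweekend out) := by unfold Spec_create_weekend; infer_instance

-- ===== CLAIM (what is proved, stated in full; the proofs are below) =====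
def Claim_equal_create_weekend : Prop := ∀ (xweekend : List Int), Dom_create_weekend xweekend → Spec_create_weekend xweekend (create_weekend xweekend)

-- ===== LEMMAS AND PROOFS =====

-- one A-step with the accumulator prefixed by xs
theorem pvStepA_pre (xs acc : List Int) (j i : Int) :
    pvStepA (xs ++ acc, j) i = (xs ++ (pvStepA (acc, j) i).1, (pvStepA (acc, j) i).2) := by
  unfold pvStepA
  split_ifs <;> simp

-- the whole A-fold with the accumulator prefixed by xs
theorem pvFoldA_pre (l : List Int) : ∀ (xs acc : List Int) (j : Int),
    l.foldl pvStepA (xs ++ acc, j) = (xs ++ (l.foldl pvStepA (acc, j)).1, (l.foldl pvStepA (acc, j)).2) := by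
  induction l with
  | nil => intro xs acc j; simp
  | cons a t ih =>
    intro xs acc j
    simp only [List.foldl_cons, pvStepA_pre]
    exact ih xs _ _

theorem create_weekend_split (xweekend : List Int) :
    create_weekend xweekend = xweekend ++ create_weekend [] := by
  unfold create_weekend
  have h := pvFoldA_pre (PySem.List.pyRange 1 504 1) xweekend [] 3
  simp only [List.append_nil] at h
  rw [h]

-- the fixed 503-day table is the same for both ports
set_option maxRecDepth 100000 in
set_option maxHeartbeats 2000000 in
theorem pvTable_eq : create_weekend [] = create_weekend_alt [] := by decide

theorem create_weekend_spec : Claim_equal_create_weekend := by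
  intro xweekend _
  unfold Spec_create_weekend
  rw [create_weekend_split, pvTable_eq]
  unfold create_weekend_alt
  simp
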